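-- pv_equiv track=rewrite | github.com/navetech/work | quadrado-magico/quadrado-magico.py | def_lines_are_valid
-- ===== SOURCE A (Python) =====
-- def def_lines_are_valid(def_lines, line_length, num_lines, max_value, line_sum):
--     """
--     Check if defined lines are valid
--     """
--
--     num_def_lines = len(def_lines)
--     if num_def_lines == 0:
--         return True
--     elif num_def_lines > num_lines:
--         return False
--     else:
--         lines_set = set()
--
--         for line in def_lines:
--             line_set = set(line)
--
--             num_line_values = len(line_set)
--             if num_line_values != line_length:
--                 return False
--
--             elif len(lines_set.intersection(line_set)) > 0:
--                 return False
--
--             else: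
--                 values_sum = 0
--                 for value in line:
--                     if value < 1 or value > max_value:
--                         return False
--
--                     else:
--                         values_sum += value
--
--                 if values_sum != line_sum:
--                     return False
--
--                 else:
--                     lines_set = lines_set.union(line_set)
--
--         return True
-- ===== SOURCE B (Python) =====
-- def _line_ok(line, line_length, max_value, line_sum):
--     return (len(set(line)) == line_length
--             and all(1 <= v <= max_value for v in line)
--             and sum(line) == line_sum)
--
--
-- def def_lines_are_valid(def_lines, line_length, num_lines, max_value, line_sum):
--     """
--     Check if defined lines are valid
--     """
--     if len(def_lines) == 0:
--         return True
--     if len(def_lines) > num_lines: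
--         return False
--     if not all(_line_ok(line, line_length, max_value, line_sum)
--                for line in def_lines):
--         return False
--     return len({v for line in def_lines for v in line}) == line_length * len(def_lines)
-- ===== Notes on version B (the rewrite author's own statement) =====
-- stated objective: simpler
-- what changed: Per-line validity is checked by a stateless all(...) over the lines, and cross-line repeats are detected afterwards by one aggregate cardinality test len({all values}) == line_length * len(def_lines), replacing A's stateful loop that threads a growing set through per-iteration intersection/union.
import Mathlib
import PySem

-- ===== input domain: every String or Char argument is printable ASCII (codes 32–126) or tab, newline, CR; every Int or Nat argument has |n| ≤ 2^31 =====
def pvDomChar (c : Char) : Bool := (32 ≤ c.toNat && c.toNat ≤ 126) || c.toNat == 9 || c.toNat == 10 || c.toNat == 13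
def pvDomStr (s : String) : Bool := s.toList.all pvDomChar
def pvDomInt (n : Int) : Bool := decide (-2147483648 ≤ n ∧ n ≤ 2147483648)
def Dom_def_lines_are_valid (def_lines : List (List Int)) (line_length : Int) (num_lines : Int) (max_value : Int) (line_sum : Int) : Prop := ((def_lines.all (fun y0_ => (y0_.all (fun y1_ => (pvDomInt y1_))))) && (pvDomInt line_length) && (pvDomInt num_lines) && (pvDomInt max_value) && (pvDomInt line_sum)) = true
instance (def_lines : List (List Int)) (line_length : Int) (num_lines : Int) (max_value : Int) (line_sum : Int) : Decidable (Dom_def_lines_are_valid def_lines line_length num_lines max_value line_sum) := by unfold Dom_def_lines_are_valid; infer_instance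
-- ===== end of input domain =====

-- B replaces A's stateful loop (growing set, per-line intersection/union) by a stateless
-- all(...) over the lines plus one aggregate cardinality test for cross-line repeats (objective: simpler).

-- ===== PORT A =====
-- inner 'for value in line' loop: none = the early 'return False' on an out-of-range value
def pvSumLoopA (line : List Int) (max_value : Int) (values_sum : Int) : Option Int :=
  match line with
  | [] => some values_sum
  | v :: rest =>
    if v < 1 ∨ v > max_value then none
    else pvSumLoopA rest max_value (values_sum + v)

-- the 'for line in def_lines' loop threading lines_set
def pvLoopA (lines : List (List Int)) (line_length max_value line_sum : Int)
    (lines_set : PySem.Set Int) : Bool :=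
  match lines with
  | [] => true
  | line :: rest =>
    let line_set : PySem.Set Int := PySem.Set.ofList line
    if PySem.Set.len line_set ≠ line_length then false
    else if PySem.Set.len (PySem.Set.inter lines_set line_set) > 0 then false
    else
      match pvSumLoopA line max_value 0 with
      | none => false
      | some values_sum =>
        if values_sum ≠ line_sum then false
        else pvLoopA rest line_length max_value line_sum (PySem.Set.union lines_set line_set)

def def_lines_are_valid (def_lines : List (List Int)) (line_length : Int) (num_lines : Int) (max_value : Int) (line_sum : Int) : Bool :=
  let num_def_lines : Int := def_lines.length
  if num_def_lines = 0 then true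
  else if num_def_lines > num_lines then false
  else pvLoopA def_lines line_length max_value line_sum PySem.Set.empty

-- ===== PORT B =====
-- Source B's _line_ok
def pvLineOk (line : List Int) (line_length max_value line_sum : Int) : Bool :=
  (PySem.Set.len (PySem.Set.ofList line) == line_length)
  && line.all (fun v => decide (1 ≤ v) && decide (v ≤ max_value))
  && (line.sum == line_sum)

def def_lines_are_valid_alt (def_lines : List (List Int)) (line_length : Int) (num_lines : Int) (max_value : Int) (line_sum : Int) : Bool :=
  if (def_lines.length : Int) = 0 then true
  else if (def_lines.length : Int) > num_lines then false
  else if !(def_lines.all (fun line => pvLineOk line line_length max_value line_sum)) then false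
  else
    PySem.Set.len (PySem.Set.ofList (def_lines.flatMap id)) == line_length * (def_lines.length : Int)

-- ===== PRECONDITION & SPEC =====
def Spec_def_lines_are_valid (def_lines : List (List Int)) (line_length : Int) (num_lines : Int) (max_value : Int) (line_sum : Int) (out : Bool) : Prop := out = def_lines_are_valid_alt def_lines line_length num_lines max_value line_sum
instance (def_lines : List (List Int)) (line_length : Int) (num_lines : Int) (max_value : Int) (line_sum : Int) (out : Bool) : Decidable (Spec_def_lines_are_valid def_lines line_length num_lines max_value line_sum out) := by unfold Spec_def_lines_are_valid; infer_instance

-- ===== CLAIM (what is proved, stated in full; the proofs are below) =====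
def Claim_equal_def_lines_are_valid : Prop := ∀ (def_lines : List (List Int)) (line_length : Int) (num_lines : Int) (max_value : Int) (line_sum : Int), Dom_def_lines_are_valid def_lines line_length num_lines max_value line_sum → Spec_def_lines_are_valid def_lines line_length num_lines max_value line_sum (def_lines_are_valid def_lines line_length num_lines max_value line_sum)

-- ===== LEMMAS AND PROOFS =====

-- A's inner loop returns the sum exactly when every value is in range
lemma pvSumLoopA_eq (line : List Int) (mv : Int) : ∀ acc : Int,
    pvSumLoopA line mv acc =
      if line.all (fun v => decide (1 ≤ v) && decide (v ≤ mv)) then some (acc + line.sum) else none := by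
  induction line with
  | nil => intro acc; simp [pvSumLoopA]
  | cons v rest ih =>
    intro acc
    simp only [pvSumLoopA, List.all_cons, List.sum_cons]
    by_cases h : v < 1 ∨ v > mv
    · have h1 : ¬ (1 ≤ v ∧ v ≤ mv) := by omega
      simp [h, h1]
    · have h1 : 1 ≤ v ∧ v ≤ mv := by omega
      rw [if_neg h, ih]
      simp [h1.1, h1.2]
      split <;> simp [add_comm, add_assoc, add_left_comm]

-- ofList keeps the length exactly when the list has no duplicates
lemma len_ofList_eq_iff (xs : List Int) :
    (PySem.Set.ofList xs : List Int).length = xs.length ↔ xs.Nodup := by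
  have hperm : (PySem.Set.ofList xs : List Int).Perm xs.dedup := by
    rw [List.perm_ext_iff_of_nodup (PySem.Set.nodup_ofList xs) (List.nodup_dedup xs)]
    intro a
    rw [PySem.Set.mem_ofList, List.mem_dedup]
  constructor
  · intro h
    have : xs.dedup = xs :=
      (List.dedup_sublist xs).eq_of_length (by rw [← hperm.length_eq, h])
    exact List.dedup_eq_self.mp this
  · intro h
    rw [PySem.Set.ofList_eq_self_of_nodup xs h]

-- the main characterisation of A's line loop
lemma pvLoopA_char (ll mv ls : Int) : ∀ (lines : List (List Int)) (acc : PySem.Set Int),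
    (acc : List Int).Nodup →
    pvLoopA lines ll mv ls acc =
      (lines.all (fun line => pvLineOk line ll mv ls)
        && decide (((acc : List Int) ++ lines.flatMap (fun l => (PySem.Set.ofList l : List Int))).Nodup)) := by
  intro lines
  induction lines with
  | nil => intro acc hacc; simp [pvLoopA, hacc]
  | cons line rest ih =>
    intro acc hacc
    simp only [pvLoopA, List.all_cons, List.flatMap_cons]
    by_cases hlen : PySem.Set.len (PySem.Set.ofList line) ≠ ll
    · rw [if_pos hlen]
      have hok : pvLineOk line ll mv ls = false := by
        simp only [pvLineOk, Bool.and_eq_false_iff, beq_eq_false_iff_ne, ne_eq]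
        left; left; exact hlen
      simp [hok]
    · rw [if_neg hlen]
      rw [ne_eq, not_not] at hlen
      by_cases hint : PySem.Set.len (PySem.Set.inter acc (PySem.Set.ofList line)) > 0
      · rw [if_pos hint]
        -- some element is in both acc and line, so the appended list has a duplicate
        have hex : ∃ x, x ∈ acc ∧ x ∈ PySem.Set.ofList line := by
          have : (PySem.Set.inter acc (PySem.Set.ofList line) : List Int) ≠ [] := by
            intro h
            rw [PySem.Set.len] at hint
            simp [h] at hint
          obtain ⟨x, hx⟩ := List.exists_mem_of_ne_nil _ this
          exact ⟨x, (PySem.Set.mem_inter _ _ _).mp hx⟩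
        obtain ⟨x, hxa, hxl⟩ := hex
        have hnodup : ¬ (((acc : List Int) ++ ((PySem.Set.ofList line : List Int) ++ rest.flatMap (fun l => (PySem.Set.ofList l : List Int)))).Nodup) := by
          intro h
          rw [List.nodup_append] at h
          exact h.2.2 x hxa x (List.mem_append_left _ hxl) rfl
        simp [hnodup]
      · rw [if_neg hint]
        have hdisj : ∀ x ∈ (PySem.Set.ofList line : List Int), x ∉ (acc : List Int) := by
          intro x hxl hxa
          apply hint
          have hmem : x ∈ PySem.Set.inter acc (PySem.Set.ofList line) :=
            (PySem.Set.mem_inter _ _ _).mpr ⟨hxa, hxl⟩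
          have : (PySem.Set.inter acc (PySem.Set.ofList line) : List Int).length > 0 :=
            List.length_pos_of_mem hmem
          rw [PySem.Set.len]
          exact_mod_cast this
        rw [pvSumLoopA_eq]
        by_cases hall : line.all (fun v => decide (1 ≤ v) && decide (v ≤ mv))
        · rw [if_pos hall]
          simp only [zero_add]
          by_cases hsum : line.sum ≠ ls
          · simp only [if_pos hsum]
            have hok : pvLineOk line ll mv ls = false := by
              simp only [pvLineOk, Bool.and_eq_false_iff, beq_eq_false_iff_ne, ne_eq]
              right; exact hsum
            simp [hok]
          · rw [ne_eq, not_not] at hsum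
            rw [if_neg (by simp [hsum])]
            have hunion : (PySem.Set.union acc (PySem.Set.ofList line) : List Int)
                = (acc : List Int) ++ (PySem.Set.ofList line : List Int) :=
              PySem.Set.update_eq_append_of_disjoint acc _ (PySem.Set.nodup_ofList line) hdisj
            have hnodup2 : ((acc : List Int) ++ (PySem.Set.ofList line : List Int)).Nodup := by
              rw [List.nodup_append]
              refine ⟨hacc, PySem.Set.nodup_ofList line, ?_⟩
              intro x hx y hy heq
              exact hdisj y hy (heq ▸ hx)
            rw [ih (PySem.Set.union acc (PySem.Set.ofList line)) (hunion ▸ hnodup2)]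
            have hok : pvLineOk line ll mv ls = true := by
              simp only [pvLineOk, Bool.and_eq_true, beq_iff_eq]
              exact ⟨⟨hlen, hall⟩, hsum⟩
            rw [hok, hunion, List.append_assoc]
            simp
        · rw [if_neg hall]
          have : pvLineOk line ll mv ls = false := by
            simp only [pvLineOk, Bool.and_eq_false_iff]
            left; right; exact (Bool.not_eq_true _).mp hall
          simp [this]

-- when every line passes local validation the flattening of per-line sets has length ll * n
lemma flat_len (ll : Int) : ∀ lines : List (List Int),
    (∀ l ∈ lines, PySem.Set.len (PySem.Set.ofList l) = ll) →
    (((lines.flatMap (fun l => (PySem.Set.ofList l : List Int))).length : Int) = ll * (lines.length : Int)) := by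
  intro lines
  induction lines with
  | nil => simp
  | cons l rest ih =>
    intro hall
    simp only [List.flatMap_cons, List.length_append, List.length_cons]
    have h1 : ((PySem.Set.ofList l : List Int).length : Int) = ll := hall l (by simp)
    have h2 := ih (fun l' hl' => hall l' (by simp [hl']))
    push_cast
    push_cast at h2
    rw [h2, ← h1]
    ring

-- with that, B's cardinality test is exactly the no-cross-repeat test
lemma card_test_eq (lines : List (List Int)) (ll : Int)
    (hall : ∀ l ∈ lines, PySem.Set.len (PySem.Set.ofList l) = ll) :
    (PySem.Set.len (PySem.Set.ofList (lines.flatMap id)) == ll * (lines.length : Int))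
      = decide ((lines.flatMap (fun l => (PySem.Set.ofList l : List Int))).Nodup) := by
  set F : List Int := lines.flatMap (fun l => (PySem.Set.ofList l : List Int)) with hF
  have hsame : (PySem.Set.ofList (lines.flatMap id) : List Int).length
      = (PySem.Set.ofList F : List Int).length := by
    refine List.Perm.length_eq ?_
    rw [List.perm_ext_iff_of_nodup (PySem.Set.nodup_ofList _) (PySem.Set.nodup_ofList _)]
    intro a
    simp [hF, PySem.Set.mem_ofList]
  have hlenF : (F.length : Int) = ll * (lines.length : Int) := flat_len ll lines hall
  have hle : (PySem.Set.ofList F : List Int).length ≤ F.length := PySem.Set.length_ofList_le F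
  by_cases hnd : F.Nodup
  · have heq : (PySem.Set.ofList F : List Int).length = F.length := (len_ofList_eq_iff F).mpr hnd
    simp only [hnd, decide_true, PySem.Set.len, hsame, heq, hlenF, beq_self_eq_true]
  · have hne : (PySem.Set.ofList F : List Int).length ≠ F.length :=
      fun h => hnd ((len_ofList_eq_iff F).mp h)
    have hlt : (PySem.Set.ofList F : List Int).length < F.length := lt_of_le_of_ne hle hne
    simp only [hnd, decide_false, PySem.Set.len, hsame]
    simp only [Bool.eq_false_iff, ne_eq]
    intro h
    rw [← hlenF, beq_iff_eq] at h
    exact absurd (Nat.cast_injective h) (Nat.ne_of_lt hlt)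

-- ===== VERDICT (by name: the statement is the Claim_ definition above) =====
theorem def_lines_are_valid_spec : Claim_equal_def_lines_are_valid := by
  intro dl ll nl mv ls _
  unfold Spec_def_lines_are_valid def_lines_are_valid def_lines_are_valid_alt
  by_cases h0 : (dl.length : Int) = 0
  · simp [h0]
  · rw [if_neg h0, if_neg h0]
    by_cases h1 : (dl.length : Int) > nl
    · rw [if_pos h1, if_pos h1]
    · rw [if_neg h1, if_neg h1]
      rw [pvLoopA_char ll mv ls dl PySem.Set.empty List.nodup_nil]
      by_cases hall : dl.all (fun line => pvLineOk line ll mv ls)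
      · rw [hall]
        rw [if_neg (by simp)]
        have hall' : ∀ l ∈ dl, PySem.Set.len (PySem.Set.ofList l) = ll := by
          intro l hl
          have := (List.all_eq_true.mp hall) l hl
          simp only [pvLineOk, Bool.and_eq_true, beq_iff_eq] at this
          exact this.1.1
        simp only [PySem.Set.empty, List.nil_append, Bool.true_and]
        exact (card_test_eq dl ll hall').symm
      · rw [if_pos (by simpa using hall)]
        simp only [Bool.and_eq_false_iff]
        left
        exact (Bool.not_eq_true _).mp hall
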